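-- pv_equiv track=rewrite | github.com/tim-jonker/advent_of_code | src/aoc2025/day12/assignment1.py | all_transformations
-- ===== SOURCE A (Python) =====
-- def rotate90(shape):
--     return {(y, -x) for (x, y) in shape}
--
-- def flip_horizontal(shape):
--     return {(-x, y) for (x, y) in shape}
--
-- def normalize(shape):
--     """Move shape so min x,y = 0 for comparison."""
--     minx = min(x for x, y in shape)
--     miny = min(y for x, y in shape)
--     return {(x-minx, y-miny) for (x, y) in shape}
--
-- def all_transformations(shape):
--     shapes = set()
--     s = normalize(shape)
--     for _ in range(4):
--         shapes.add(tuple(sorted(s)))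
--         s = normalize(rotate90(s))
--     # flip and rotate again
--     s = normalize(flip_horizontal(normalize(shape)))
--     for _ in range(4):
--         shapes.add(tuple(sorted(s)))
--         s = normalize(rotate90(s))
--     # convert back to sets
--     return [set(coords) for coords in shapes]
-- ===== SOURCE B (Python) =====
-- def _canon(points):
--     """Translate so min x,y = 0, return as a sorted tuple of coords."""
--     mx = min(x for x, _ in points)
--     my = min(y for _, y in points)
--     return tuple(sorted((x - mx, y - my) for (x, y) in points))
--
--
-- _TRANSFORMS = [
--     lambda x, y: (x, y),
--     lambda x, y: (y, -x),
--     lambda x, y: (-x, -y),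
--     lambda x, y: (-y, x),
--     lambda x, y: (-x, y),
--     lambda x, y: (y, x),
--     lambda x, y: (x, -y),
--     lambda x, y: (-y, -x),
-- ]
--
--
-- def all_transformations(shape):
--     base = set(_canon(shape))
--     shapes = set()
--     for t in _TRANSFORMS:
--         shapes.add(_canon({t(x, y) for (x, y) in base}))
--     return [set(coords) for coords in shapes]
-- ===== Notes on version B (the rewrite author's own statement) =====
-- stated objective: simpler
-- what changed: B replaces A's two sequential loops that repeatedly rotate and renormalize the running shape by a single flat pass over an explicit list of the 8 dihedral coordinate maps, canonicalizing (normalize + sort) each image of the once-normalized base shape.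
import Mathlib
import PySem

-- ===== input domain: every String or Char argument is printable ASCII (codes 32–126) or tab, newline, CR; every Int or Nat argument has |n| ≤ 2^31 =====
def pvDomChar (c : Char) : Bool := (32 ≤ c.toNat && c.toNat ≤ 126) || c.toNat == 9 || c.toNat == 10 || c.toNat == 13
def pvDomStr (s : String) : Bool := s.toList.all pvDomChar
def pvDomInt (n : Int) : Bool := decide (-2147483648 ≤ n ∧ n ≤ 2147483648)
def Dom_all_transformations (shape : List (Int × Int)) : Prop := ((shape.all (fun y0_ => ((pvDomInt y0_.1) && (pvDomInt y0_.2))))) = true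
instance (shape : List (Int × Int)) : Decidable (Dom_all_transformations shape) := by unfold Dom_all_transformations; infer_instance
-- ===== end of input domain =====

-- B replaces A's two iterative rotate-and-renormalize loops by one flat pass over an explicit
-- list of the 8 dihedral coordinate maps (objective: simpler; not claimed faster).

-- ===== PORT A =====
def pyRotate90 (shape : List (Int × Int)) : List (Int × Int) :=
  PySem.Set.ofList (shape.map (fun p => (p.2, -p.1)))

def pyFlipHorizontal (shape : List (Int × Int)) : List (Int × Int) :=
  PySem.Set.ofList (shape.map (fun p => (-p.1, p.2)))

-- min(...) over a generator is ported as PySem.List.minD with a junk default 0; Pre_ gives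
-- shape ≠ [] so the default is never the result (Python raises ValueError on an empty shape).
def pyNormalize (shape : List (Int × Int)) : List (Int × Int) :=
  let minx := PySem.List.minD (shape.map (fun p => p.1)) (fun x => x) 0
  let miny := PySem.List.minD (shape.map (fun p => p.2)) (fun y => y) 0
  PySem.Set.ofList (shape.map (fun p => (p.1 - minx, p.2 - miny)))

def all_transformations (shape : List (Int × Int)) : List (List (Int × Int)) :=
  let body := fun (st : PySem.Set (List (Int × Int)) × List (Int × Int)) (_ : Int) =>
    (PySem.Set.add st.1 (PySem.List.sorted2 st.2 (fun p => p.1) (fun p => p.2)),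
     pyNormalize (pyRotate90 st.2))
  let st1 := (PySem.List.pyRange 0 4 1).foldl body (PySem.Set.empty, pyNormalize shape)
  let st2 := (PySem.List.pyRange 0 4 1).foldl body
      (st1.1, pyNormalize (pyFlipHorizontal (pyNormalize shape)))
  st2.1.map (fun coords => PySem.Set.ofList coords)

-- ===== PORT B =====
def bCanon (points : List (Int × Int)) : List (Int × Int) :=
  let mx := PySem.List.minD (points.map (fun p => p.1)) (fun x => x) 0
  let my := PySem.List.minD (points.map (fun p => p.2)) (fun y => y) 0
  PySem.List.sorted2 (points.map (fun p => (p.1 - mx, p.2 - my))) (fun p => p.1) (fun p => p.2)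

def bTransforms : List ((Int × Int) → (Int × Int)) :=
  [fun p => (p.1, p.2), fun p => (p.2, -p.1), fun p => (-p.1, -p.2), fun p => (-p.2, p.1),
   fun p => (-p.1, p.2), fun p => (p.2, p.1), fun p => (p.1, -p.2), fun p => (-p.2, -p.1)]

def all_transformations_alt (shape : List (Int × Int)) : List (List (Int × Int)) :=
  let base := PySem.Set.ofList (bCanon shape)
  let shapes := bTransforms.foldl
      (fun (sh : PySem.Set (List (Int × Int))) t =>
        PySem.Set.add sh (bCanon (PySem.Set.ofList (base.map t))))
      PySem.Set.empty
  shapes.map (fun coords => PySem.Set.ofList coords)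

-- ===== PRECONDITION & SPEC =====
-- Pre_ excludes only the empty shape, on which Python A (and B) raise ValueError from min().
def Pre_all_transformations (shape : List (Int × Int)) : Prop := shape ≠ []
instance (shape : List (Int × Int)) : Decidable (Pre_all_transformations shape) := by unfold Pre_all_transformations; infer_instance

def pvWitness_all_transformations : (List (Int × Int)) := [(0, 0), (1, 0), (1, 1)]

def Spec_all_transformations (shape : List (Int × Int)) (out : List (List (Int × Int))) : Prop := out = all_transformations_alt shape
instance (shape : List (Int × Int)) (out : List (List (Int × Int))) : Decidable (Spec_all_transformations shape out) := by unfold Spec_all_transformations; infer_instance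

-- ===== CLAIM (what is proved, stated in full; the proofs are below) =====
def Claim_equal_all_transformations : Prop := ∀ (shape : List (Int × Int)), Dom_all_transformations shape → Pre_all_transformations shape → Spec_all_transformations shape (all_transformations shape)

-- ===== LEMMAS AND PROOFS =====

-- membership-equality of two lists viewed as point sets
def ptsEq (u v : List (Int × Int)) : Prop := ∀ p, p ∈ u ↔ p ∈ v

theorem ptsEq_refl (u : List (Int × Int)) : ptsEq u u := fun _ => Iff.rfl

theorem ptsEq_symm {u v : List (Int × Int)} (h : ptsEq u v) : ptsEq v u := fun p => (h p).symm

theorem ptsEq_trans {u v w : List (Int × Int)} (h1 : ptsEq u v) (h2 : ptsEq v w) : ptsEq u w :=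
  fun p => (h1 p).trans (h2 p)

theorem ptsEq_ofList (u : List (Int × Int)) : ptsEq (PySem.Set.ofList u) u :=
  fun p => PySem.Set.mem_ofList u p

theorem ne_nil_of_ptsEq {u v : List (Int × Int)} (h : ptsEq u v) (hu : u ≠ []) : v ≠ [] := by
  match u, hu with
  | x :: t, _ => exact List.ne_nil_of_mem ((h x).1 (List.mem_cons_self))

theorem ptsEq_map {u v : List (Int × Int)} (g : (Int × Int) → (Int × Int)) (h : ptsEq u v) :
    ptsEq (u.map g) (v.map g) := by
  intro p
  simp only [List.mem_map]
  constructor <;> rintro ⟨q, hq, rfl⟩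
  · exact ⟨q, (h q).1 hq, rfl⟩
  · exact ⟨q, (h q).2 hq, rfl⟩

theorem minD_id_eq {xs ys : List Int} (h : ∀ a, a ∈ xs ↔ a ∈ ys) (hx : xs ≠ []) (hy : ys ≠ []) :
    PySem.List.minD xs (fun x => x) 0 = PySem.List.minD ys (fun x => x) 0 :=
  le_antisymm
    (PySem.List.minD_id_le xs 0 _ ((h _).2 (PySem.List.minD_mem ys (fun x => x) 0 hy)))
    (PySem.List.minD_id_le ys 0 _ ((h _).1 (PySem.List.minD_mem xs (fun x => x) 0 hx)))

theorem minD_map_add {xs : List Int} (hx : xs ≠ []) (c : Int) :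
    PySem.List.minD (xs.map (fun x => x + c)) (fun x => x) 0
      = PySem.List.minD xs (fun x => x) 0 + c := by
  have hmx : xs.map (fun x => x + c) ≠ [] := by simpa using hx
  have h1 : PySem.List.minD (xs.map (fun x => x + c)) (fun x => x) 0 ∈ xs.map (fun x => x + c) :=
    PySem.List.minD_mem _ _ 0 hmx
  have h2 : PySem.List.minD xs (fun x => x) 0 ∈ xs := PySem.List.minD_mem _ _ 0 hx
  obtain ⟨z, hz, hze⟩ := List.mem_map.1 h1
  have hle1 : PySem.List.minD xs (fun x => x) 0 ≤ z := PySem.List.minD_id_le xs 0 z hz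
  have hle2 : PySem.List.minD (xs.map (fun x => x + c)) (fun x => x) 0
      ≤ PySem.List.minD xs (fun x => x) 0 + c :=
    PySem.List.minD_id_le _ 0 _ (List.mem_map.2 ⟨_, h2, rfl⟩)
  omega

-- the two min expressions of normalize/canon
def mnx (u : List (Int × Int)) : Int := PySem.List.minD (u.map (fun p => p.1)) (fun x => x) 0
def mny (u : List (Int × Int)) : Int := PySem.List.minD (u.map (fun p => p.2)) (fun y => y) 0

theorem pyNormalize_def (u : List (Int × Int)) :
    pyNormalize u = PySem.Set.ofList (u.map (fun p => (p.1 - mnx u, p.2 - mny u))) := rfl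

theorem bCanon_def (u : List (Int × Int)) :
    bCanon u = PySem.List.sorted2 (u.map (fun p => (p.1 - mnx u, p.2 - mny u)))
      (fun p => p.1) (fun p => p.2) := rfl

theorem mem_pyNormalize {u : List (Int × Int)} {p : Int × Int} :
    p ∈ pyNormalize u ↔ ∃ q ∈ u, (q.1 - mnx u, q.2 - mny u) = p := by
  rw [pyNormalize_def]
  constructor
  · intro h; exact List.mem_map.1 ((ptsEq_ofList _ p).1 h)
  · intro h; exact (ptsEq_ofList _ p).2 (List.mem_map.2 h)

theorem pyNormalize_nodup (u : List (Int × Int)) : (pyNormalize u).Nodup := by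
  rw [pyNormalize_def]; exact PySem.Set.nodup_ofList _

theorem pyNormalize_ne_nil {u : List (Int × Int)} (hu : u ≠ []) : pyNormalize u ≠ [] := by
  rw [pyNormalize_def]
  apply ne_nil_of_ptsEq (ptsEq_symm (ptsEq_ofList _))
  simpa using hu

theorem mnx_congr {u v : List (Int × Int)} (h : ptsEq u v) (hu : u ≠ []) (hv : v ≠ []) :
    mnx u = mnx v := by
  apply minD_id_eq _ (by simpa using hu) (by simpa using hv)
  intro a
  simp only [List.mem_map]
  constructor <;> rintro ⟨q, hq, rfl⟩
  · exact ⟨q, (h q).1 hq, rfl⟩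
  · exact ⟨q, (h q).2 hq, rfl⟩

theorem mny_congr {u v : List (Int × Int)} (h : ptsEq u v) (hu : u ≠ []) (hv : v ≠ []) :
    mny u = mny v := by
  apply minD_id_eq _ (by simpa using hu) (by simpa using hv)
  intro a
  simp only [List.mem_map]
  constructor <;> rintro ⟨q, hq, rfl⟩
  · exact ⟨q, (h q).1 hq, rfl⟩
  · exact ⟨q, (h q).2 hq, rfl⟩

theorem ptsEq_pyNormalize_congr {u v : List (Int × Int)} (h : ptsEq u v) (hu : u ≠ []) (hv : v ≠ []) :
    ptsEq (pyNormalize u) (pyNormalize v) := by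
  intro p
  rw [mem_pyNormalize, mem_pyNormalize, mnx_congr h hu hv, mny_congr h hu hv]
  constructor <;> rintro ⟨q, hq, rfl⟩
  · exact ⟨q, (h q).1 hq, rfl⟩
  · exact ⟨q, (h q).2 hq, rfl⟩

theorem mnx_map_shift {u : List (Int × Int)} (hu : u ≠ []) (c d : Int) :
    mnx (u.map (fun p => (p.1 + c, p.2 + d))) = mnx u + c := by
  unfold mnx
  rw [List.map_map, show ((fun p : Int × Int => p.1) ∘ fun p : Int × Int => (p.1 + c, p.2 + d))
      = ((fun x => x + c) ∘ fun p : Int × Int => p.1) from rfl, ← List.map_map]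
  exact minD_map_add (by simpa using hu) c

theorem mny_map_shift {u : List (Int × Int)} (hu : u ≠ []) (c d : Int) :
    mny (u.map (fun p => (p.1 + c, p.2 + d))) = mny u + d := by
  unfold mny
  rw [List.map_map, show ((fun p : Int × Int => p.2) ∘ fun p : Int × Int => (p.1 + c, p.2 + d))
      = ((fun x => x + d) ∘ fun p : Int × Int => p.2) from rfl, ← List.map_map]
  exact minD_map_add (by simpa using hu) d

theorem ptsEq_pyNormalize_shift {u : List (Int × Int)} (hu : u ≠ []) (c d : Int) :
    ptsEq (pyNormalize (u.map (fun p => (p.1 + c, p.2 + d)))) (pyNormalize u) := by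
  intro p
  rw [mem_pyNormalize, mem_pyNormalize, mnx_map_shift hu c d, mny_map_shift hu c d]
  constructor
  · rintro ⟨q, hq, rfl⟩
    obtain ⟨r, hr, rfl⟩ := List.mem_map.1 hq
    exact ⟨r, hr, by simp only [Prod.mk.injEq]; constructor <;> ring⟩
  · rintro ⟨q, hq, rfl⟩
    exact ⟨(q.1 + c, q.2 + d), List.mem_map.2 ⟨q, hq, rfl⟩, by simp only [Prod.mk.injEq]; constructor <;> ring⟩

-- linear coordinate maps (the D4 matrices)
def GM (a b c d : Int) : (Int × Int) → (Int × Int) :=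
  fun p => (a * p.1 + b * p.2, c * p.1 + d * p.2)

def NG (u : List (Int × Int)) (a b c d : Int) : List (Int × Int) :=
  pyNormalize (u.map (GM a b c d))

-- an outer normalize absorbs an inner one through a linear map
theorem ptsEq_N_map_N (a b c d : Int) {v : List (Int × Int)} (hv : v ≠ []) :
    ptsEq (pyNormalize ((pyNormalize v).map (GM a b c d))) (pyNormalize (v.map (GM a b c d))) := by
  have h1 : ptsEq ((pyNormalize v).map (GM a b c d))
      ((v.map (GM a b c d)).map (fun p =>
        (p.1 + (-(a * mnx v + b * mny v)), p.2 + (-(c * mnx v + d * mny v))))) := by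
    intro p
    constructor
    · intro hp
      obtain ⟨q, hq, rfl⟩ := List.mem_map.1 hp
      obtain ⟨r, hr, rfl⟩ := mem_pyNormalize.1 hq
      refine List.mem_map.2 ⟨GM a b c d r, List.mem_map.2 ⟨r, hr, rfl⟩, ?_⟩
      simp [GM, Prod.ext_iff]; constructor <;> ring
    · intro hp
      obtain ⟨q, hq, rfl⟩ := List.mem_map.1 hp
      obtain ⟨r, hr, rfl⟩ := List.mem_map.1 hq
      refine List.mem_map.2 ⟨(r.1 - mnx v, r.2 - mny v), mem_pyNormalize.2 ⟨r, hr, rfl⟩, ?_⟩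
      simp [GM, Prod.ext_iff]; constructor <;> ring
  have hmapne : v.map (GM a b c d) ≠ [] := by simpa using hv
  have h2 := ptsEq_pyNormalize_shift hmapne (-(a * mnx v + b * mny v)) (-(c * mnx v + d * mny v))
  have hne1 : (pyNormalize v).map (GM a b c d) ≠ [] := by
    simpa using pyNormalize_ne_nil hv
  exact ptsEq_trans (ptsEq_pyNormalize_congr h1 hne1 (ne_nil_of_ptsEq h1 hne1)) h2

-- one normalize-of-image step on top of an already characterised set
theorem N_map_step {u w : List (Int × Int)} {a b c d e f g h : Int} (hu : u ≠ [])
    (hw : ptsEq w (NG u a b c d)) (t : (Int × Int) → (Int × Int))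
    (ht : ∀ p : Int × Int, t p = (e * p.1 + f * p.2, g * p.1 + h * p.2)) :
    ptsEq (pyNormalize (PySem.Set.ofList (w.map t)))
      (NG u (e*a+f*c) (e*b+f*d) (g*a+h*c) (g*b+h*d)) := by
  have hmapne : u.map (GM a b c d) ≠ [] := by simpa using hu
  have hNGne : NG u a b c d ≠ [] := pyNormalize_ne_nil hmapne
  have hwne : w ≠ [] := ne_nil_of_ptsEq (ptsEq_symm hw) hNGne
  have htG : w.map t = w.map (GM e f g h) := List.map_congr_left (fun p _ => ht p)
  have h1 : ptsEq (PySem.Set.ofList (w.map t)) ((NG u a b c d).map (GM e f g h)) := by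
    rw [htG]
    exact ptsEq_trans (ptsEq_ofList _) (ptsEq_map _ hw)
  have hcomp : (u.map (GM a b c d)).map (GM e f g h)
      = u.map (GM (e*a+f*c) (e*b+f*d) (g*a+h*c) (g*b+h*d)) := by
    rw [List.map_map]
    apply List.map_congr_left
    intro p _
    simp [GM, Function.comp, Prod.ext_iff]; constructor <;> ring
  have h3 := ptsEq_N_map_N e f g h (v := u.map (GM a b c d)) hmapne
  rw [hcomp] at h3
  refine ptsEq_trans (ptsEq_pyNormalize_congr h1 ?_ ?_) h3
  · apply ne_nil_of_ptsEq (ptsEq_symm (ptsEq_ofList _)) (by simpa using hwne)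
  · simpa using hNGne

-- sorted(tuple-pairs) is sorting by the lexicographic key
theorem sorted2_eq_sorted_lex (xs : List (Int × Int)) :
    PySem.List.sorted2 xs (fun p => p.1) (fun p => p.2)
      = PySem.List.sorted xs (fun p => toLex p) := by
  have hb : (fun (a b : Int × Int) =>
        decide ((fun (p : Int × Int) => p.1) a < (fun (p : Int × Int) => p.1) b) ||
          (!decide ((fun (p : Int × Int) => p.1) b < (fun (p : Int × Int) => p.1) a) &&
            decide ((fun (p : Int × Int) => p.2) a < (fun (p : Int × Int) => p.2) b)))
      = (fun (a b : Int × Int) => decide ((fun (p : Int × Int) => toLex p) a < (fun (p : Int × Int) => toLex p) b)) := by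
    funext a b
    simp only [Prod.Lex.toLex_lt_toLex]
    by_cases h1 : a.1 < b.1 <;> by_cases h2 : b.1 < a.1 <;> by_cases h3 : a.2 < b.2 <;>
      simp [h1, h2, h3] <;> omega
  simp only [PySem.List.sorted, PySem.List.sorted2]
  rw [hb]
  simp

theorem mem_sorted2 {xs : List (Int × Int)} {p : Int × Int} :
    p ∈ PySem.List.sorted2 xs (fun q => q.1) (fun q => q.2) ↔ p ∈ xs :=
  (PySem.List.sorted2_perm xs _ _ false).mem_iff

theorem shift_injective (c d : Int) :
    Function.Injective (fun p : Int × Int => (p.1 - c, p.2 - d)) := by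
  rintro ⟨x1, y1⟩ ⟨x2, y2⟩ h
  simp [Prod.ext_iff] at h ⊢
  omega

-- the element B adds for transform t equals sorted(s_k) whenever s_k has the members NG u a b c d
theorem elem_eq {u w : List (Int × Int)} (a b c d : Int) (hu : u ≠ []) (hwn : w.Nodup)
    (hw : ptsEq w (NG u a b c d)) (t : (Int × Int) → (Int × Int))
    (ht : ∀ p : Int × Int, t p = (a * p.1 + b * p.2, c * p.1 + d * p.2)) :
    PySem.List.sorted2 w (fun p => p.1) (fun p => p.2)
      = bCanon (PySem.Set.ofList ((PySem.Set.ofList (bCanon u)).map t)) := by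
  have hbase : ptsEq (PySem.Set.ofList (bCanon u)) (pyNormalize u) := by
    intro p
    rw [bCanon_def, pyNormalize_def, PySem.Set.mem_ofList, PySem.Set.mem_ofList]
    exact mem_sorted2
  have hNu : ptsEq (pyNormalize u) (NG u 1 0 0 1) := by
    unfold NG
    have hid : u.map (GM 1 0 0 1) = u := by
      conv_rhs => rw [← List.map_id u]
      apply List.map_congr_left
      intro p _
      simp [GM]
    rw [hid]
    exact ptsEq_refl _
  -- img has the members NG u a b c d
  have himg : ptsEq (pyNormalize (PySem.Set.ofList ((PySem.Set.ofList (bCanon u)).map t)))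
      (NG u a b c d) := by
    have := N_map_step (e := a) (f := b) (g := c) (h := d) hu
      (w := PySem.Set.ofList (bCanon u)) (ptsEq_trans hbase hNu) t ht
    have harith : (NG u (a*1+b*0) (a*0+b*1) (c*1+d*0) (c*0+d*1)) = NG u a b c d := by norm_num
    rwa [harith] at this
  -- B's added element is sorted2 of the translated image, which is ptsEq to pyNormalize img
  set img := PySem.Set.ofList ((PySem.Set.ofList (bCanon u)).map t) with himg_def
  have hL : ptsEq (img.map (fun p => (p.1 - mnx img, p.2 - mny img))) (pyNormalize img) := by
    rw [pyNormalize_def]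
    exact ptsEq_symm (ptsEq_ofList _)
  have hLn : (img.map (fun p => (p.1 - mnx img, p.2 - mny img))).Nodup :=
    List.Nodup.map (shift_injective _ _) (PySem.Set.nodup_ofList _)
  have hperm : w.Perm (img.map (fun p => (p.1 - mnx img, p.2 - mny img))) :=
    (List.perm_ext_iff_of_nodup hwn hLn).2
      (fun p => ((hw p).trans (himg p).symm).trans (hL p).symm)
  rw [bCanon_def, sorted2_eq_sorted_lex, sorted2_eq_sorted_lex]
  exact PySem.List.sorted_eq_sorted_of_perm _ _ _ toLex.injective hperm

-- A's two loop state sequences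
def sA (u : List (Int × Int)) : Nat → List (Int × Int)
  | 0 => pyNormalize u
  | k+1 => pyNormalize (pyRotate90 (sA u k))

def tA (u : List (Int × Int)) : Nat → List (Int × Int)
  | 0 => pyNormalize (pyFlipHorizontal (pyNormalize u))
  | k+1 => pyNormalize (pyRotate90 (tA u k))

theorem pyRange04 : PySem.List.pyRange 0 4 1 = [0, 1, 2, 3] := by decide

theorem A_unfold (u : List (Int × Int)) :
    all_transformations u =
      (PySem.Set.add (PySem.Set.add (PySem.Set.add (PySem.Set.add (PySem.Set.add
        (PySem.Set.add (PySem.Set.add (PySem.Set.add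
          (PySem.Set.empty : PySem.Set (List (Int × Int)))
          (PySem.List.sorted2 (sA u 0) (fun p => p.1) (fun p => p.2)))
          (PySem.List.sorted2 (sA u 1) (fun p => p.1) (fun p => p.2)))
          (PySem.List.sorted2 (sA u 2) (fun p => p.1) (fun p => p.2)))
          (PySem.List.sorted2 (sA u 3) (fun p => p.1) (fun p => p.2)))
          (PySem.List.sorted2 (tA u 0) (fun p => p.1) (fun p => p.2)))
          (PySem.List.sorted2 (tA u 1) (fun p => p.1) (fun p => p.2)))
          (PySem.List.sorted2 (tA u 2) (fun p => p.1) (fun p => p.2)))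
          (PySem.List.sorted2 (tA u 3) (fun p => p.1) (fun p => p.2))).map
        (fun coords => PySem.Set.ofList coords) := by
  simp only [all_transformations, pyRange04, List.foldl, sA, tA]

theorem B_unfold (u : List (Int × Int)) :
    all_transformations_alt u =
      (PySem.Set.add (PySem.Set.add (PySem.Set.add (PySem.Set.add (PySem.Set.add
        (PySem.Set.add (PySem.Set.add (PySem.Set.add
          (PySem.Set.empty : PySem.Set (List (Int × Int)))
          (bCanon (PySem.Set.ofList ((PySem.Set.ofList (bCanon u)).map (fun p => (p.1, p.2))))))
          (bCanon (PySem.Set.ofList ((PySem.Set.ofList (bCanon u)).map (fun p => (p.2, -p.1))))))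
          (bCanon (PySem.Set.ofList ((PySem.Set.ofList (bCanon u)).map (fun p => (-p.1, -p.2))))))
          (bCanon (PySem.Set.ofList ((PySem.Set.ofList (bCanon u)).map (fun p => (-p.2, p.1))))))
          (bCanon (PySem.Set.ofList ((PySem.Set.ofList (bCanon u)).map (fun p => (-p.1, p.2))))))
          (bCanon (PySem.Set.ofList ((PySem.Set.ofList (bCanon u)).map (fun p => (p.2, p.1))))))
          (bCanon (PySem.Set.ofList ((PySem.Set.ofList (bCanon u)).map (fun p => (p.1, -p.2))))))
          (bCanon (PySem.Set.ofList ((PySem.Set.ofList (bCanon u)).map (fun p => (-p.2, -p.1)))))).map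
        (fun coords => PySem.Set.ofList coords) := by
  simp only [all_transformations_alt, bTransforms, List.foldl]

theorem sA_nodup (u : List (Int × Int)) (k : Nat) : (sA u k).Nodup := by
  cases k <;> exact pyNormalize_nodup _

theorem tA_nodup (u : List (Int × Int)) (k : Nat) : (tA u k).Nodup := by
  cases k <;> exact pyNormalize_nodup _

-- ===== VERDICT (by name: the statement is the Claim_ definition above) =====
theorem all_transformations_spec : Claim_equal_all_transformations := by
  intro u _ hu
  unfold Spec_all_transformations
  have hs0 : ptsEq (sA u 0) (NG u 1 0 0 1) := by
    show ptsEq (pyNormalize u) (NG u 1 0 0 1)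
    unfold NG
    have hid : u.map (GM 1 0 0 1) = u := by
      conv_rhs => rw [← List.map_id u]
      apply List.map_congr_left
      intro p _
      simp [GM]
    rw [hid]
    exact ptsEq_refl _
  have hstep : ∀ (a b c d : Int) (w : List (Int × Int)), ptsEq w (NG u a b c d) →
      ptsEq (pyNormalize (pyRotate90 w)) (NG u c d (-a) (-b)) := by
    intro a b c d w hw
    have := N_map_step (e := 0) (f := 1) (g := -1) (h := 0) hu hw
      (fun p => (p.2, -p.1)) (fun p => by simp only [Prod.mk.injEq]; constructor <;> ring)
    have harith : NG u (0*a+1*c) (0*b+1*d) ((-1)*a+0*c) ((-1)*b+0*d) = NG u c d (-a) (-b) := by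
      norm_num
    rw [harith] at this
    exact this
  have hs1 : ptsEq (sA u 1) (NG u 0 1 (-1) 0) := by
    have := hstep 1 0 0 1 (sA u 0) hs0
    norm_num at this
    exact this
  have hs2 : ptsEq (sA u 2) (NG u (-1) 0 0 (-1)) := by
    have := hstep 0 1 (-1) 0 (sA u 1) hs1
    norm_num at this
    exact this
  have hs3 : ptsEq (sA u 3) (NG u 0 (-1) 1 0) := by
    have := hstep (-1) 0 0 (-1) (sA u 2) hs2
    norm_num at this
    exact this
  have ht0 : ptsEq (tA u 0) (NG u (-1) 0 0 1) := by
    show ptsEq (pyNormalize (pyFlipHorizontal (pyNormalize u))) (NG u (-1) 0 0 1)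
    have := N_map_step (e := -1) (f := 0) (g := 0) (h := 1) hu hs0
      (fun p => (-p.1, p.2)) (fun p => by simp only [Prod.mk.injEq]; constructor <;> ring)
    have harith : NG u ((-1)*1+0*0) ((-1)*0+0*1) (0*1+1*0) (0*0+1*1) = NG u (-1) 0 0 1 := by
      norm_num
    rw [harith] at this
    exact this
  have ht1 : ptsEq (tA u 1) (NG u 0 1 1 0) := by
    have := hstep (-1) 0 0 1 (tA u 0) ht0
    norm_num at this
    exact this
  have ht2 : ptsEq (tA u 2) (NG u 1 0 0 (-1)) := by
    have := hstep 0 1 1 0 (tA u 1) ht1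
    norm_num at this
    exact this
  have ht3 : ptsEq (tA u 3) (NG u 0 (-1) (-1) 0) := by
    have := hstep 1 0 0 (-1) (tA u 2) ht2
    norm_num at this
    exact this
  rw [A_unfold, B_unfold]
  rw [elem_eq 1 0 0 1 hu (sA_nodup u 0) hs0 (fun p => (p.1, p.2)) (fun p => by simp only [Prod.mk.injEq]; constructor <;> ring)]
  rw [elem_eq 0 1 (-1) 0 hu (sA_nodup u 1) hs1 (fun p => (p.2, -p.1)) (fun p => by simp only [Prod.mk.injEq]; constructor <;> ring)]
  rw [elem_eq (-1) 0 0 (-1) hu (sA_nodup u 2) hs2 (fun p => (-p.1, -p.2)) (fun p => by simp only [Prod.mk.injEq]; constructor <;> ring)]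
  rw [elem_eq 0 (-1) 1 0 hu (sA_nodup u 3) hs3 (fun p => (-p.2, p.1)) (fun p => by simp only [Prod.mk.injEq]; constructor <;> ring)]
  rw [elem_eq (-1) 0 0 1 hu (tA_nodup u 0) ht0 (fun p => (-p.1, p.2)) (fun p => by simp only [Prod.mk.injEq]; constructor <;> ring)]
  rw [elem_eq 0 1 1 0 hu (tA_nodup u 1) ht1 (fun p => (p.2, p.1)) (fun p => by simp only [Prod.mk.injEq]; constructor <;> ring)]
  rw [elem_eq 1 0 0 (-1) hu (tA_nodup u 2) ht2 (fun p => (p.1, -p.2)) (fun p => by simp only [Prod.mk.injEq]; constructor <;> ring)]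
  rw [elem_eq 0 (-1) (-1) 0 hu (tA_nodup u 3) ht3 (fun p => (-p.2, -p.1)) (fun p => by simp only [Prod.mk.injEq]; constructor <;> ring)]
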